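-- pv_equiv track=rewrite | github.com/thekoushikdurgas/Deloitte- | test/final_comprehensive_converter.py | _split_into_statements
-- ===== SOURCE A (Python) =====
-- from typing import Dict, List, Any, Optional, Union, Tuple
--
-- def _split_into_statements(content: str) -> List[str]:
--     """Split content into statements"""
--     statements = []
--     current_stmt = ""
--     paren_depth = 0
--     if_depth = 0
--     case_depth = 0
--
--     for line in content.split('\n'):
--         line = line.strip()
--         if not line:
--             continue
--
--         # Track nesting
--         paren_depth += line.count('(') - line.count(')')
--
--         line_upper = line.upper()
--         if_depth += line_upper.count(' IF ') - line_upper.count('END IF')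
--         case_depth += line_upper.count('CASE ') - line_upper.count('END CASE')
--
--         current_stmt += ' ' + line
--
--         # Check for statement completion
--         if (line.endswith(';') and paren_depth == 0 and
--             if_depth == 0 and case_depth == 0):
--             statements.append(current_stmt.strip())
--             current_stmt = ""
--
--     if current_stmt.strip():
--         statements.append(current_stmt.strip())
--
--     return statements
-- ===== SOURCE B (Python) =====
-- from typing import List
--
-- def _split_into_statements(content: str) -> List[str]:
--     """Two-pass: precompute per-line cumulative depths, find boundary indices, slice into groups."""
--     lines = [s for s in (raw.strip() for raw in content.split('\n')) if s]
--
--     depths = []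
--     paren = if_d = case_d = 0
--     for line in lines:
--         paren += line.count('(') - line.count(')')
--         u = line.upper()
--         if_d += u.count(' IF ') - u.count('END IF')
--         case_d += u.count('CASE ') - u.count('END CASE')
--         depths.append((paren, if_d, case_d))
--
--     boundaries = [k for k, (line, d) in enumerate(zip(lines, depths))
--                   if line.endswith(';') and d == (0, 0, 0)]
--
--     groups = []
--     start = 0
--     for b in boundaries:
--         groups.append(lines[start:b + 1])
--         start = b + 1
--     if start < len(lines):
--         groups.append(lines[start:])
--
--     return [' '.join(g) for g in groups]
-- ===== Notes on version B (the rewrite author's own statement) =====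
-- stated objective: alternative
-- what changed: A accumulates a growing statement string and emits it inline while looping; B is multi-pass: it precomputes the stripped non-empty lines and their cumulative (paren, if, case) depths, collects the boundary indices where a line ends with a semicolon at zero depths, slices the line list into groups at those indices, and joins each group.
import Mathlib
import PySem

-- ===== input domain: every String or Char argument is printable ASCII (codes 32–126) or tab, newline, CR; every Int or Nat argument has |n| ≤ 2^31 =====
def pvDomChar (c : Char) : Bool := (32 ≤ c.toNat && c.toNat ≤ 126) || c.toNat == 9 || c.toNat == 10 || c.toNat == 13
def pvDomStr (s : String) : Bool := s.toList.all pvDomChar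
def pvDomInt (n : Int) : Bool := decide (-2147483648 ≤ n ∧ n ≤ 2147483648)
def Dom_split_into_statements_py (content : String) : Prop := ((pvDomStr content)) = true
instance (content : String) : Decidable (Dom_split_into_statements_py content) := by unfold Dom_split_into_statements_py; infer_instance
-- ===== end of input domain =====

-- B restructures A's single accumulate-and-emit loop into explicit passes: line table, cumulative
-- depth table, boundary indices, slicing into groups; same result, same cost (objective: alternative).

-- ===== PORT A =====
-- A: one fold carrying (statements, current_stmt, paren_depth, if_depth, case_depth); strings as char lists.
def split_into_statements_py (content : String) : List String :=
  let res :=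
    (PySem.Chars.splitOn content.toList "\n".toList).foldl
      (fun st raw =>
        match st with
        | (stmts, cur, p, i, c) =>
          let line := PySem.Chars.strip raw
          if line.isEmpty then (stmts, cur, p, i, c)
          else
            let p := p + (PySem.Chars.count line "(".toList : Int) - (PySem.Chars.count line ")".toList : Int)
            let u := PySem.Chars.upper line
            let i := i + (PySem.Chars.count u " IF ".toList : Int) - (PySem.Chars.count u "END IF".toList : Int)
            let c := c + (PySem.Chars.count u "CASE ".toList : Int) - (PySem.Chars.count u "END CASE".toList : Int)
            let cur := cur ++ ' ' :: line
            if PySem.Chars.endswith line ";".toList && p == 0 && i == 0 && c == 0 then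
              (stmts ++ [PySem.Chars.strip cur], ([] : List Char), p, i, c)
            else (stmts, cur, p, i, c))
      (([] : List (List Char)), ([] : List Char), (0 : Int), (0 : Int), (0 : Int))
  let stmts := if (PySem.Chars.strip res.2.1).isEmpty then res.1 else res.1 ++ [PySem.Chars.strip res.2.1]
  stmts.map String.ofList

-- ===== PORT B =====
-- B, pass 1: the stripped non-empty lines.
def pvLines (content : String) : List (List Char) :=
  ((PySem.Chars.splitOn content.toList "\n".toList).map PySem.Chars.strip).filter (fun s => !s.isEmpty)

-- B, pass 2: cumulative (paren, if, case) depth after each line.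
def pvDepths (lines : List (List Char)) : List (Int × Int × Int) :=
  (lines.foldl
    (fun acc line =>
      match acc with
      | (depths, p, i, c) =>
        let p := p + (PySem.Chars.count line "(".toList : Int) - (PySem.Chars.count line ")".toList : Int)
        let u := PySem.Chars.upper line
        let i := i + (PySem.Chars.count u " IF ".toList : Int) - (PySem.Chars.count u "END IF".toList : Int)
        let c := c + (PySem.Chars.count u "CASE ".toList : Int) - (PySem.Chars.count u "END CASE".toList : Int)
        (depths ++ [(p, i, c)], p, i, c))
    (([] : List (Int × Int × Int)), (0 : Int), (0 : Int), (0 : Int))).1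

-- B, pass 3: indices of lines that close a statement.
def pvBoundaries (lines : List (List Char)) (depths : List (Int × Int × Int)) : List Int :=
  ((PySem.List.enumerate (lines.zip depths)).filter
    (fun kld => PySem.Chars.endswith kld.2.1 ";".toList && kld.2.2 == ((0 : Int), (0 : Int), (0 : Int)))).map (·.1)

-- B, pass 4: slice the line list into groups at the boundaries (plus the trailing group, if any).
def pvGroups (lines : List (List Char)) (bs : List Int) : List (List (List Char)) :=
  let r := bs.foldl
    (fun acc b => (acc.1 ++ [PySem.List.slice lines (some acc.2) (some (b + 1))], b + 1))
    (([] : List (List (List Char))), (0 : Int))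
  if r.2 < (lines.length : Int) then r.1 ++ [PySem.List.slice lines (some r.2) none] else r.1

def split_into_statements_py_alt (content : String) : List String :=
  let lines := pvLines content
  let groups := pvGroups lines (pvBoundaries lines (pvDepths lines))
  groups.map (fun g => String.ofList (PySem.Chars.join " ".toList g))

-- ===== PRECONDITION & SPEC =====
def Spec_split_into_statements_py (content : String) (out : List String) : Prop := out = split_into_statements_py_alt content
instance (content : String) (out : List String) : Decidable (Spec_split_into_statements_py content out) := by unfold Spec_split_into_statements_py; infer_instance

-- ===== CLAIM (what is proved, stated in full; the proofs are below) =====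
def Claim_equal_split_into_statements_py : Prop := ∀ (content : String), Dom_split_into_statements_py content → Spec_split_into_statements_py content (split_into_statements_py content)

-- ===== LEMMAS AND PROOFS =====

-- Per-line depth change, and the boundary test, shared vocabulary of the proofs.
def pvDelta (l : List Char) : Int × Int × Int :=
  ((PySem.Chars.count l "(".toList : Int) - (PySem.Chars.count l ")".toList : Int),
   (PySem.Chars.count (PySem.Chars.upper l) " IF ".toList : Int) - (PySem.Chars.count (PySem.Chars.upper l) "END IF".toList : Int),
   (PySem.Chars.count (PySem.Chars.upper l) "CASE ".toList : Int) - (PySem.Chars.count (PySem.Chars.upper l) "END CASE".toList : Int))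

def pvAdd (d e : Int × Int × Int) : Int × Int × Int := (d.1 + e.1, d.2.1 + e.2.1, d.2.2 + e.2.2)

def pvBdy (l : List Char) (d : Int × Int × Int) : Bool :=
  PySem.Chars.endswith l ";".toList && d == ((0 : Int), (0 : Int), (0 : Int))

def pvJoin (g : List (List Char)) : List Char := PySem.Chars.join " ".toList g

-- The common intermediate: the groups of consecutive lines, cut after each boundary line.
def pvSpec : Int × Int × Int → List (List Char) → List (List (List Char))
  | _, [] => []
  | d, l :: ls =>
    let d' := pvAdd d (pvDelta l)
    if pvBdy l d' then [l] :: pvSpec d' ls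
    else
      match pvSpec d' ls with
      | [] => [[l]]
      | g :: gs => (l :: g) :: gs

-- a "good" line: non-empty, no leading/trailing whitespace (the shape strip produces when non-empty)
def pvGood (l : List Char) : Bool :=
  !l.isEmpty && !PySem.Chars.isspace (l.headD ' ') && !PySem.Chars.isspace (l.getLastD ' ')

theorem pvHeadD_dropWhile (p : Char → Bool) (l : List Char) (h : l.dropWhile p ≠ []) :
    p ((l.dropWhile p).headD ' ') = false := by
  have := List.head_dropWhile_not p (w := h)
  rwa [List.headD_eq_head?, List.head?_eq_head h, Option.getD_some]

theorem pvGood_strip (raw : List Char) (h : (PySem.Chars.strip raw).isEmpty = false) :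
    pvGood (PySem.Chars.strip raw) = true := by
  unfold PySem.Chars.strip PySem.Chars.rstrip PySem.Chars.lstrip at *
  set m := raw.dropWhile PySem.Chars.isspace with hm
  set t := m.reverse.dropWhile PySem.Chars.isspace with ht
  have htne : t ≠ [] := by
    intro h0; rw [h0] at h; simp at h
  -- last char of the result = head of t, not a space
  have hlast : (t.reverse).getLastD ' ' = t.headD ' ' := by
    rw [List.getLastD_eq_getLast?, List.getLast?_reverse, ← List.headD_eq_head?]
  have hlastns : PySem.Chars.isspace (t.reverse.getLastD ' ') = false := by
    rw [hlast]; exact pvHeadD_dropWhile _ _ htne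
  -- head of the result = head of m, not a space
  have hpre : t.reverse <+: m := by
    rw [← List.reverse_reverse m]
    exact List.reverse_prefix.mpr (List.dropWhile_suffix _)
  have hne : t.reverse ≠ [] := by simpa using htne
  obtain ⟨a, r, har⟩ := List.exists_cons_of_ne_nil hne
  obtain ⟨u, hu⟩ := hpre
  have hmne : m ≠ [] := by rw [← hu, har]; simp
  have hheadm : m.headD ' ' = a := by rw [← hu, har]; rfl
  have hheadns : PySem.Chars.isspace (t.reverse.headD ' ') = false := by
    rw [har]
    have := pvHeadD_dropWhile PySem.Chars.isspace raw hmne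
    rw [← hm, hheadm] at this
    simpa using this
  unfold pvGood
  rw [hlastns, hheadns]
  simp [htne]

theorem pvStrip_space_cons (x : List Char) (h : pvGood x = true) :
    PySem.Chars.strip (' ' :: x) = x := by
  unfold pvGood at h
  simp only [Bool.and_eq_true, Bool.not_eq_true'] at h
  obtain ⟨⟨hne, hhead⟩, hlast⟩ := h
  have hxne : x ≠ [] := by simpa using hne
  obtain ⟨a, r, rfl⟩ := List.exists_cons_of_ne_nil hxne
  unfold PySem.Chars.strip PySem.Chars.lstrip PySem.Chars.rstrip
  have hsp : PySem.Chars.isspace ' ' = true := by decide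
  rw [List.dropWhile_cons]
  simp only [hsp, if_pos]
  rw [List.dropWhile_cons]
  simp only [List.headD_cons] at hhead
  simp only [hhead, Bool.false_eq_true, if_false]
  -- now rstrip (a :: r) = a :: r since its last char is not a space
  have hrevne : (a :: r).reverse ≠ [] := by simp
  obtain ⟨b, s, hbs⟩ := List.exists_cons_of_ne_nil hrevne
  have hb : b = (a :: r).getLastD ' ' := by
    have := congrArg (fun l => List.headD l ' ') hbs
    simp only [List.headD_cons] at this
    rw [← this, List.headD_eq_head?, List.head?_reverse, ← List.getLastD_eq_getLast?]
  rw [hbs, List.dropWhile_cons]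
  have hbns : PySem.Chars.isspace b = false := by rw [hb]; exact hlast
  simp only [hbns, Bool.false_eq_true, if_false]
  rw [← hbs, List.reverse_reverse]

theorem pvGood_join (g : List (List Char)) (hne : g ≠ []) (h : ∀ l ∈ g, pvGood l = true) :
    pvGood (pvJoin g) = true := by
  induction g with
  | nil => exact absurd rfl hne
  | cons a t ih =>
    cases t with
    | nil =>
      unfold pvJoin
      rw [PySem.Chars.join_singleton]
      exact h a (by simp)
    | cons b u =>
      have hj : pvJoin (a :: b :: u) = a ++ ' ' :: pvJoin (b :: u) := by
        unfold pvJoin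
        rw [PySem.Chars.join_cons_cons, List.append_assoc]
        rfl
      have ha : pvGood a = true := h a (by simp)
      have hrest : pvGood (pvJoin (b :: u)) = true := by
        exact ih (by simp) (fun l hl => h l (by simp [hl]))
      unfold pvGood at ha hrest ⊢
      simp only [Bool.and_eq_true, Bool.not_eq_true'] at ha hrest ⊢
      obtain ⟨⟨hane, hahead⟩, _⟩ := ha
      obtain ⟨⟨hrne, _⟩, hrlast⟩ := hrest
      have hane' : a ≠ [] := by simpa using hane
      have hrne' : pvJoin (b :: u) ≠ [] := by simpa using hrne
      obtain ⟨x, y, rfl⟩ := List.exists_cons_of_ne_nil hane'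
      refine ⟨⟨by simp [hj], ?_⟩, ?_⟩
      · simpa [hj] using hahead
      · obtain ⟨c, w, hcw⟩ := List.exists_cons_of_ne_nil hrne'
        rw [hj, hcw]
        have h1 : (x :: y ++ ' ' :: c :: w).getLastD ' ' = (c :: w).getLastD ' ' := by
          simp [List.getLastD_eq_getLast?, List.getLast?_cons, List.getLast?_append]
        rw [h1, ← hcw]
        exact hrlast

def pvCur (g : List (List Char)) : List Char := if g.isEmpty then [] else ' ' :: pvJoin g

theorem pvJoin_append_singleton (g : List (List Char)) (l : List Char) (hg : g ≠ []) :
    pvJoin (g ++ [l]) = pvJoin g ++ ' ' :: l := by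
  induction g with
  | nil => exact absurd rfl hg
  | cons a t ih =>
    cases t with
    | nil =>
      unfold pvJoin
      rw [List.cons_append, List.nil_append, PySem.Chars.join_cons_cons,
        PySem.Chars.join_singleton, PySem.Chars.join_singleton]
      simp
    | cons b u =>
      have ihh := ih (by simp)
      unfold pvJoin at ihh ⊢
      simp only [List.cons_append] at ihh ⊢
      rw [PySem.Chars.join_cons_cons (p := a) (q := b) (rest := u ++ [l]),
        PySem.Chars.join_cons_cons (p := a) (q := b) (rest := u), ihh]
      simp [List.append_assoc]

theorem pvCur_append (g : List (List Char)) (l : List Char) :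
    pvCur (g ++ [l]) = pvCur g ++ ' ' :: l := by
  cases g with
  | nil => simp [pvCur, pvJoin, PySem.Chars.join_singleton]
  | cons a t =>
    unfold pvCur
    rw [pvJoin_append_singleton (a :: t) l (by simp)]
    simp [List.cons_append]

def pvGlue (g : List (List Char)) (gs : List (List (List Char))) : List (List (List Char)) :=
  match gs with
  | [] => if g.isEmpty then [] else [g]
  | h :: t => (g ++ h) :: t

theorem pvGlue_nil (gs : List (List (List Char))) : pvGlue [] gs = gs := by
  cases gs <;> simp [pvGlue]

-- clean form of A's loop body (on an already stripped, non-empty line)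
def pvAStep (st : List (List Char) × List Char × Int × Int × Int) (l : List Char) :
    List (List Char) × List Char × Int × Int × Int :=
  let d' := pvAdd (st.2.2.1, st.2.2.2.1, st.2.2.2.2) (pvDelta l)
  let cur := st.2.1 ++ ' ' :: l
  if pvBdy l d' then (st.1 ++ [PySem.Chars.strip cur], ([] : List Char), d'.1, d'.2.1, d'.2.2)
  else (st.1, cur, d'.1, d'.2.1, d'.2.2)

def pvFinal (st : List (List Char) × List Char × Int × Int × Int) : List (List Char) :=
  if (PySem.Chars.strip st.2.1).isEmpty then st.1 else st.1 ++ [PySem.Chars.strip st.2.1]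

theorem pvBdy_eq (l : List Char) (p i c : Int) :
    (PySem.Chars.endswith l ";".toList && p == 0 && i == 0 && c == 0) = pvBdy l (p, i, c) := by
  have : ((p, i, c) == ((0 : Int), (0 : Int), (0 : Int))) = (p == 0 && (i == 0 && c == 0)) := rfl
  unfold pvBdy
  rw [this, Bool.and_assoc, Bool.and_assoc]

-- A's fold over the raw lines is pvAStep folded over the stripped non-empty lines
theorem pvA_fold_lines (content : String) :
    (PySem.Chars.splitOn content.toList "\n".toList).foldl
      (fun st raw =>
        match st with
        | (stmts, cur, p, i, c) =>
          let line := PySem.Chars.strip raw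
          if line.isEmpty then (stmts, cur, p, i, c)
          else
            let p := p + (PySem.Chars.count line "(".toList : Int) - (PySem.Chars.count line ")".toList : Int)
            let u := PySem.Chars.upper line
            let i := i + (PySem.Chars.count u " IF ".toList : Int) - (PySem.Chars.count u "END IF".toList : Int)
            let c := c + (PySem.Chars.count u "CASE ".toList : Int) - (PySem.Chars.count u "END CASE".toList : Int)
            let cur := cur ++ ' ' :: line
            if PySem.Chars.endswith line ";".toList && p == 0 && i == 0 && c == 0 then
              (stmts ++ [PySem.Chars.strip cur], ([] : List Char), p, i, c)
            else (stmts, cur, p, i, c))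
      (([] : List (List Char)), ([] : List Char), (0 : Int), (0 : Int), (0 : Int))
    = (pvLines content).foldl pvAStep (([] : List (List Char)), ([] : List Char), (0 : Int), (0 : Int), (0 : Int)) := by
  have hstep : (fun (st : List (List Char) × List Char × Int × Int × Int) (raw : List Char) =>
      match st with
      | (stmts, cur, p, i, c) =>
        let line := PySem.Chars.strip raw
        if line.isEmpty then (stmts, cur, p, i, c)
        else
          let p := p + (PySem.Chars.count line "(".toList : Int) - (PySem.Chars.count line ")".toList : Int)
          let u := PySem.Chars.upper line
          let i := i + (PySem.Chars.count u " IF ".toList : Int) - (PySem.Chars.count u "END IF".toList : Int)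
          let c := c + (PySem.Chars.count u "CASE ".toList : Int) - (PySem.Chars.count u "END CASE".toList : Int)
          let cur := cur ++ ' ' :: line
          if PySem.Chars.endswith line ";".toList && p == 0 && i == 0 && c == 0 then
            (stmts ++ [PySem.Chars.strip cur], ([] : List Char), p, i, c)
          else (stmts, cur, p, i, c))
      = (fun st raw =>
          if (!(PySem.Chars.strip raw).isEmpty) then pvAStep st (PySem.Chars.strip raw) else st) := by
    funext st raw
    obtain ⟨stmts, cur, p, i, c⟩ := st
    simp only
    by_cases hemp : (PySem.Chars.strip raw).isEmpty
    · simp [hemp]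
    · simp only [hemp, Bool.false_eq_true, if_false, Bool.not_false, if_true]
      rw [pvBdy_eq]
      unfold pvAStep pvAdd pvDelta
      simp only
      have e1 : p + (PySem.Chars.count (PySem.Chars.strip raw) "(".toList : Int) - (PySem.Chars.count (PySem.Chars.strip raw) ")".toList : Int)
          = p + ((PySem.Chars.count (PySem.Chars.strip raw) "(".toList : Int) - (PySem.Chars.count (PySem.Chars.strip raw) ")".toList : Int)) := by ring
      have e2 : i + (PySem.Chars.count (PySem.Chars.upper (PySem.Chars.strip raw)) " IF ".toList : Int) - (PySem.Chars.count (PySem.Chars.upper (PySem.Chars.strip raw)) "END IF".toList : Int)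
          = i + ((PySem.Chars.count (PySem.Chars.upper (PySem.Chars.strip raw)) " IF ".toList : Int) - (PySem.Chars.count (PySem.Chars.upper (PySem.Chars.strip raw)) "END IF".toList : Int)) := by ring
      have e3 : c + (PySem.Chars.count (PySem.Chars.upper (PySem.Chars.strip raw)) "CASE ".toList : Int) - (PySem.Chars.count (PySem.Chars.upper (PySem.Chars.strip raw)) "END CASE".toList : Int)
          = c + ((PySem.Chars.count (PySem.Chars.upper (PySem.Chars.strip raw)) "CASE ".toList : Int) - (PySem.Chars.count (PySem.Chars.upper (PySem.Chars.strip raw)) "END CASE".toList : Int)) := by ring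
      rw [e1, e2, e3]
  rw [hstep]
  rw [List.foldl_map (f := PySem.Chars.strip)
    (g := fun st line => if (!line.isEmpty) then pvAStep st line else st) |>.symm]
  rw [PySem.List.foldl_if_eq_foldl_filter (p := fun line => !line.isEmpty) (f := pvAStep)]
  rfl

theorem pvA_main (L : List (List Char)) (hL : ∀ l ∈ L, pvGood l = true) :
    ∀ (stmts : List (List Char)) (g : List (List Char)) (d : Int × Int × Int),
      (∀ l ∈ g, pvGood l = true) →
      pvFinal (L.foldl pvAStep (stmts, pvCur g, d.1, d.2.1, d.2.2))
        = stmts ++ (pvGlue g (pvSpec d L)).map pvJoin := by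
  induction L with
  | nil =>
    intro stmts g d hg
    unfold pvFinal pvSpec pvGlue
    cases hgE : g.isEmpty with
    | true =>
      have : g = [] := by simpa using hgE
      subst this
      simp [pvCur]
      rfl
    | false =>
      have hgne : g ≠ [] := by simpa using hgE
      have hjg := pvGood_join g hgne hg
      have hstr : PySem.Chars.strip (pvCur g) = pvJoin g := by
        unfold pvCur
        rw [hgE, if_neg (by simp)]
        exact pvStrip_space_cons _ hjg
      simp only [List.foldl_nil, hstr, hgE]
      have hjne : (pvJoin g).isEmpty = false := by
        unfold pvGood at hjg
        simp only [Bool.and_eq_true] at hjg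
        simpa using hjg.1.1
      simp [hjne]
  | cons l ls ih =>
    intro stmts g d hg
    have hgoodl : pvGood l = true := hL l (by simp)
    have hLtail : ∀ x ∈ ls, pvGood x = true := fun x hx => hL x (by simp [hx])
    have hgl : ∀ x ∈ g ++ [l], pvGood x = true := by
      intro x hx
      rcases List.mem_append.mp hx with h1 | h2
      · exact hg x h1
      · simp only [List.mem_singleton] at h2; subst h2; exact hgoodl
    simp only [List.foldl_cons]
    have hstep : pvAStep (stmts, pvCur g, d.1, d.2.1, d.2.2) l
        = (if pvBdy l (pvAdd d (pvDelta l))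
            then (stmts ++ [pvJoin (g ++ [l])], pvCur [],
              (pvAdd d (pvDelta l)).1, (pvAdd d (pvDelta l)).2.1, (pvAdd d (pvDelta l)).2.2)
            else (stmts, pvCur (g ++ [l]),
              (pvAdd d (pvDelta l)).1, (pvAdd d (pvDelta l)).2.1, (pvAdd d (pvDelta l)).2.2)) := by
      unfold pvAStep
      simp only
      have hcur : pvCur g ++ ' ' :: l = pvCur (g ++ [l]) := (pvCur_append g l).symm
      have hadd : pvAdd (d.1, d.2.1, d.2.2) (pvDelta l) = pvAdd d (pvDelta l) := rfl
      rw [hcur, hadd]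
      have hstr2 : PySem.Chars.strip (pvCur (g ++ [l])) = pvJoin (g ++ [l]) := by
        unfold pvCur
        rw [if_neg (by simp)]
        exact pvStrip_space_cons _ (pvGood_join _ (by simp) hgl)
      rw [hstr2]
      rfl
    rw [hstep]
    cases hb : pvBdy l (pvAdd d (pvDelta l)) with
    | true =>
      simp only [if_pos]
      rw [ih hLtail (stmts ++ [pvJoin (g ++ [l])]) [] (pvAdd d (pvDelta l)) (by intro x hx; cases hx)]
      rw [pvGlue_nil]
      show _ = stmts ++ (pvGlue g (pvSpec d (l :: ls))).map pvJoin
      rw [pvSpec]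
      simp only [hb, if_pos]
      unfold pvGlue
      simp [List.append_assoc]
    | false =>
      simp only [Bool.false_eq_true, if_false]
      rw [ih hLtail stmts (g ++ [l]) (pvAdd d (pvDelta l)) hgl]
      show _ = stmts ++ (pvGlue g (pvSpec d (l :: ls))).map pvJoin
      rw [pvSpec]
      simp only [hb, Bool.false_eq_true, if_false]
      cases hsp : pvSpec (pvAdd d (pvDelta l)) ls with
      | nil => unfold pvGlue; simp
      | cons h t => unfold pvGlue; simp

-- ===== B side =====

def pvScan : Int × Int × Int → List (List Char) → List (Int × Int × Int)
  | _, [] => []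
  | d, l :: ls => let d' := pvAdd d (pvDelta l); d' :: pvScan d' ls

theorem pvDepths_go (L : List (List Char)) :
    ∀ (acc : List (Int × Int × Int)) (d : Int × Int × Int),
      (L.foldl
        (fun acc line =>
          match acc with
          | (depths, p, i, c) =>
            let p := p + (PySem.Chars.count line "(".toList : Int) - (PySem.Chars.count line ")".toList : Int)
            let u := PySem.Chars.upper line
            let i := i + (PySem.Chars.count u " IF ".toList : Int) - (PySem.Chars.count u "END IF".toList : Int)
            let c := c + (PySem.Chars.count u "CASE ".toList : Int) - (PySem.Chars.count u "END CASE".toList : Int)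
            (depths ++ [(p, i, c)], p, i, c))
        (acc, d.1, d.2.1, d.2.2)).1 = acc ++ pvScan d L := by
  induction L with
  | nil => intro acc d; simp [pvScan]
  | cons l ls ih =>
    intro acc d
    simp only [List.foldl_cons]
    have hst : (acc ++ [(d.1 + (PySem.Chars.count l "(".toList : Int) - (PySem.Chars.count l ")".toList : Int),
          d.2.1 + (PySem.Chars.count (PySem.Chars.upper l) " IF ".toList : Int) - (PySem.Chars.count (PySem.Chars.upper l) "END IF".toList : Int),
          d.2.2 + (PySem.Chars.count (PySem.Chars.upper l) "CASE ".toList : Int) - (PySem.Chars.count (PySem.Chars.upper l) "END CASE".toList : Int))],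
          d.1 + (PySem.Chars.count l "(".toList : Int) - (PySem.Chars.count l ")".toList : Int),
          d.2.1 + (PySem.Chars.count (PySem.Chars.upper l) " IF ".toList : Int) - (PySem.Chars.count (PySem.Chars.upper l) "END IF".toList : Int),
          d.2.2 + (PySem.Chars.count (PySem.Chars.upper l) "CASE ".toList : Int) - (PySem.Chars.count (PySem.Chars.upper l) "END CASE".toList : Int))
        = ((acc ++ [pvAdd d (pvDelta l)], (pvAdd d (pvDelta l)).1, (pvAdd d (pvDelta l)).2.1, (pvAdd d (pvDelta l)).2.2)
            : List (Int × Int × Int) × Int × Int × Int) := by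
      unfold pvAdd pvDelta
      simp only [Prod.mk.injEq]
      exact ⟨by norm_num; constructor <;> [skip; constructor] <;> ring, by ring, by ring, by ring⟩
    rw [hst]
    rw [ih (acc ++ [pvAdd d (pvDelta l)]) (pvAdd d (pvDelta l))]
    simp [pvScan]

theorem pvDepths_eq (lines : List (List Char)) : pvDepths lines = pvScan (0, 0, 0) lines := by
  unfold pvDepths
  have := pvDepths_go lines [] (0, 0, 0)
  simpa using this

def pvBnds : Int → Int × Int × Int → List (List Char) → List Int
  | _, _, [] => []
  | k, d, l :: ls =>
    let d' := pvAdd d (pvDelta l)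
    if pvBdy l d' then k :: pvBnds (k + 1) d' ls else pvBnds (k + 1) d' ls

theorem pvBnds_go (L : List (List Char)) :
    ∀ (d : Int × Int × Int) (k : Int),
      ((PySem.List.enumerate (L.zip (pvScan d L)) k).filter
        (fun kld => PySem.Chars.endswith kld.2.1 ";".toList && kld.2.2 == ((0 : Int), (0 : Int), (0 : Int)))).map (·.1)
      = pvBnds k d L := by
  induction L with
  | nil => intro d k; simp [pvScan, pvBnds, PySem.List.enumerate]
  | cons l ls ih =>
    intro d k
    simp only [pvScan]
    rw [show (l :: ls).zip (pvAdd d (pvDelta l) :: pvScan (pvAdd d (pvDelta l)) ls)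
        = (l, pvAdd d (pvDelta l)) :: ls.zip (pvScan (pvAdd d (pvDelta l)) ls) from rfl]
    rw [show PySem.List.enumerate ((l, pvAdd d (pvDelta l)) :: ls.zip (pvScan (pvAdd d (pvDelta l)) ls)) k
        = (k, l, pvAdd d (pvDelta l)) :: PySem.List.enumerate (ls.zip (pvScan (pvAdd d (pvDelta l)) ls)) (k + 1) from rfl]
    rw [List.filter_cons]
    rw [pvBnds]
    simp only
    have hcond : (PySem.Chars.endswith l ";".toList && pvAdd d (pvDelta l) == ((0 : Int), (0 : Int), (0 : Int)))
        = pvBdy l (pvAdd d (pvDelta l)) := rfl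
    rw [hcond]
    cases hb : pvBdy l (pvAdd d (pvDelta l)) with
    | true =>
      simp only [hb, if_true, List.map_cons]
      rw [ih (pvAdd d (pvDelta l)) (k + 1)]
    | false =>
      simp only [hb, Bool.false_eq_true, if_false]
      rw [ih (pvAdd d (pvDelta l)) (k + 1)]

theorem pvBoundaries_eq (lines : List (List Char)) :
    pvBoundaries lines (pvScan (0, 0, 0) lines) = pvBnds 0 (0, 0, 0) lines := by
  unfold pvBoundaries
  exact pvBnds_go lines (0, 0, 0) 0

def pvGStep (L : List (List Char)) (acc : List (List (List Char)) × Int) (b : Int) :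
    List (List (List Char)) × Int :=
  (acc.1 ++ [PySem.List.slice L (some acc.2) (some (b + 1))], b + 1)

def pvRes (L : List (List Char)) (s : Int) (bs : List Int) : List (List (List Char)) :=
  let r := bs.foldl (pvGStep L) ([], s)
  if r.2 < (L.length : Int) then r.1 ++ [PySem.List.slice L (some r.2) none] else r.1

theorem pvGroups_eq (L : List (List Char)) (bs : List Int) : pvGroups L bs = pvRes L 0 bs := rfl

theorem pvFold_acc (L : List (List Char)) (bs : List Int) :
    ∀ (gs : List (List (List Char))) (s : Int),
      bs.foldl (pvGStep L) (gs, s)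
        = (gs ++ (bs.foldl (pvGStep L) ([], s)).1, (bs.foldl (pvGStep L) ([], s)).2) := by
  induction bs with
  | nil => intro gs s; simp
  | cons b rest ih =>
    intro gs s
    simp only [List.foldl_cons, pvGStep, List.nil_append]
    rw [ih (gs ++ [PySem.List.slice L (some s) (some (b + 1))]) (b + 1),
      ih [PySem.List.slice L (some s) (some (b + 1))] (b + 1)]
    simp [List.append_assoc]

theorem pvRes_cons (L : List (List Char)) (s b : Int) (rest : List Int) :
    pvRes L s (b :: rest) = PySem.List.slice L (some s) (some (b + 1)) :: pvRes L (b + 1) rest := by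
  unfold pvRes
  simp only [List.foldl_cons, pvGStep, List.nil_append]
  rw [pvFold_acc L rest [PySem.List.slice L (some s) (some (b + 1))] (b + 1)]
  split <;> simp

theorem pvSlice_shift {α : Type} (x : α) (xs : List α) {a b : Int} (ha : 0 ≤ a) (hb : 0 ≤ b) :
    PySem.List.slice (x :: xs) (some (a + 1)) (some (b + 1)) = PySem.List.slice xs (some a) (some b) := by
  rw [PySem.List.slice_toNat _ (by omega) (by omega), PySem.List.slice_toNat _ ha hb]
  have h1 : (a + 1).toNat = a.toNat + 1 := by omega
  have h2 : (b + 1).toNat - (a + 1).toNat = b.toNat - a.toNat := by omega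
  rw [h2, h1, List.drop_succ_cons]

theorem pvSliceFrom_shift {α : Type} (x : α) (xs : List α) {a : Int} (ha : 0 ≤ a) :
    PySem.List.slice (x :: xs) (some (a + 1)) none = PySem.List.slice xs (some a) none := by
  rw [PySem.List.slice_from _ (by omega), PySem.List.slice_from _ ha]
  have h1 : (a + 1).toNat = a.toNat + 1 := by omega
  rw [h1, List.drop_succ_cons]

theorem pvSlice_zero_none (xs : List (List Char)) : PySem.List.slice xs (some (0 : Int)) none = xs := by
  rw [PySem.List.slice_from _ le_rfl]
  simp

theorem pvBnds_shift (L : List (List Char)) :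
    ∀ (k : Int) (d : Int × Int × Int), pvBnds (k + 1) d L = (pvBnds k d L).map (· + 1) := by
  induction L with
  | nil => intro k d; simp [pvBnds]
  | cons l ls ih =>
    intro k d
    simp only [pvBnds]
    cases hb : pvBdy l (pvAdd d (pvDelta l)) with
    | true =>
      simp only [hb, if_true, List.map_cons]
      rw [ih (k + 1) (pvAdd d (pvDelta l))]
    | false =>
      simp only [hb, Bool.false_eq_true, if_false]
      exact ih (k + 1) (pvAdd d (pvDelta l))

theorem pvBnds_nonneg (L : List (List Char)) :
    ∀ (k : Int) (d : Int × Int × Int) (b : Int), 0 ≤ k → b ∈ pvBnds k d L → 0 ≤ b := by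
  induction L with
  | nil => intro k d b _ hb; simp [pvBnds] at hb
  | cons l ls ih =>
    intro k d b hk hb
    simp only [pvBnds] at hb
    cases hc : pvBdy l (pvAdd d (pvDelta l)) with
    | true =>
      rw [hc, if_pos rfl] at hb
      rcases List.mem_cons.mp hb with rfl | hmem
      · exact hk
      · exact ih (k + 1) (pvAdd d (pvDelta l)) b (by omega) hmem
    | false =>
      rw [hc] at hb
      simp only [Bool.false_eq_true, if_false] at hb
      exact ih (k + 1) (pvAdd d (pvDelta l)) b (by omega) hb

theorem pvRes_shift (l : List Char) (ls : List (List Char)) :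
    ∀ (bs : List Int), (∀ b ∈ bs, 0 ≤ b) → ∀ (s : Int), 0 ≤ s →
      pvRes (l :: ls) (s + 1) (bs.map (· + 1)) = pvRes ls s bs := by
  intro bs
  induction bs generalizing l ls with
  | nil =>
    intro _ s hs
    unfold pvRes
    simp only [List.map_nil, List.foldl_nil]
    have hlen : ((l :: ls).length : Int) = (ls.length : Int) + 1 := by
      simp [List.length_cons]
    rw [hlen]
    by_cases h : s < (ls.length : Int)
    · rw [if_pos (by omega), if_pos h, pvSliceFrom_shift l ls hs]
    · rw [if_neg (by omega), if_neg h]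
  | cons b rest ih =>
    intro hnn s hs
    have hb0 : 0 ≤ b := hnn b (by simp)
    simp only [List.map_cons]
    rw [pvRes_cons, pvRes_cons, pvSlice_shift l ls hs (by omega : (0:Int) ≤ b + 1)]
    rw [ih l ls (fun x hx => hnn x (by simp [hx])) (b + 1) (by omega)]

theorem pvB_core (L : List (List Char)) :
    ∀ (d : Int × Int × Int), pvRes L 0 (pvBnds 0 d L) = pvSpec d L := by
  induction L with
  | nil =>
    intro d
    unfold pvRes pvSpec pvBnds
    simp
  | cons l ls ih =>
    intro d
    simp only [pvBnds, pvSpec]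
    have hshift : pvBnds (0 + 1) (pvAdd d (pvDelta l)) ls
        = (pvBnds 0 (pvAdd d (pvDelta l)) ls).map (· + 1) := pvBnds_shift ls 0 (pvAdd d (pvDelta l))
    have hnn : ∀ b ∈ pvBnds 0 (pvAdd d (pvDelta l)) ls, 0 ≤ b :=
      fun b hb => pvBnds_nonneg ls 0 (pvAdd d (pvDelta l)) b le_rfl hb
    cases hb : pvBdy l (pvAdd d (pvDelta l)) with
    | true =>
      simp only [hb, if_true]
      rw [hshift, pvRes_cons]
      have hsl : PySem.List.slice (l :: ls) (some (0 : Int)) (some (0 + 1)) = [l] := by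
        rw [PySem.List.slice_toNat _ le_rfl (by omega)]
        simp
      rw [hsl, pvRes_shift l ls _ hnn 0 le_rfl, ih (pvAdd d (pvDelta l))]
    | false =>
      simp only [hb, Bool.false_eq_true, if_false]
      rw [hshift]
      cases hbs : pvBnds 0 (pvAdd d (pvDelta l)) ls with
      | nil =>
        simp only [List.map_nil]
        rw [show pvSpec (pvAdd d (pvDelta l)) ls = pvRes ls 0 [] by rw [← ih (pvAdd d (pvDelta l)), hbs]]
        unfold pvRes
        simp only [List.foldl_nil]
        rw [pvSlice_zero_none, pvSlice_zero_none]
        cases ls with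
        | nil => simp
        | cons x xs =>
          have h1 : (0 : Int) < ((l :: x :: xs).length : Int) := by
            simp only [List.length_cons]; push_cast; omega
          have h2 : (0 : Int) < ((x :: xs).length : Int) := by
            simp only [List.length_cons]; push_cast; omega
          rw [if_pos h1, if_pos h2]
          simp
      | cons b rest =>
        simp only [List.map_cons]
        rw [pvRes_cons]
        have hb0 : 0 ≤ b := hnn b (by rw [hbs]; simp)
        have hsl : PySem.List.slice (l :: ls) (some (0 : Int)) (some (b + 1 + 1))
            = l :: PySem.List.slice ls (some (0 : Int)) (some (b + 1)) := by
          rw [PySem.List.slice_toNat _ le_rfl (by omega), PySem.List.slice_toNat _ le_rfl (by omega)]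
          simp only [List.drop_zero, Int.toNat_zero, Nat.sub_zero]
          have h3 : (b + 1 + 1).toNat = (b + 1).toNat + 1 := by omega
          rw [h3, List.take_succ_cons]
        rw [hsl, pvRes_shift l ls rest (fun x hx => hnn x (by rw [hbs]; simp [hx])) (b + 1) (by omega)]
        rw [show pvSpec (pvAdd d (pvDelta l)) ls
            = PySem.List.slice ls (some (0 : Int)) (some (b + 1)) :: pvRes ls (b + 1) rest by
          rw [← ih (pvAdd d (pvDelta l)), hbs, pvRes_cons]]

theorem pvB_main (L : List (List Char)) (d : Int × Int × Int) :
    pvGroups L (pvBnds 0 d L) = pvSpec d L := by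
  rw [pvGroups_eq]
  exact pvB_core L d

-- ===== VERDICT (by name: the statement is the Claim_ definition above) =====
theorem split_into_statements_py_spec : Claim_equal_split_into_statements_py := by
  intro content _
  unfold Spec_split_into_statements_py
  unfold split_into_statements_py split_into_statements_py_alt
  show List.map String.ofList
      (pvFinal ((PySem.Chars.splitOn content.toList "\n".toList).foldl _ (([] : List (List Char)), ([] : List Char), (0 : Int), (0 : Int), (0 : Int))))
    = List.map (fun g => String.ofList (PySem.Chars.join " ".toList g))
        (pvGroups (pvLines content) (pvBoundaries (pvLines content) (pvDepths (pvLines content))))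
  rw [pvA_fold_lines, pvDepths_eq, pvBoundaries_eq, pvB_main]
  have hgood : ∀ l ∈ pvLines content, pvGood l = true := by
    intro l hl
    unfold pvLines at hl
    simp only [List.mem_filter, List.mem_map] at hl
    obtain ⟨⟨raw, _, rfl⟩, hne⟩ := hl
    exact pvGood_strip raw (by simpa using hne)
  have hA := pvA_main (pvLines content) hgood [] [] (0, 0, 0) (by intro l hl; cases hl)
  rw [pvGlue_nil] at hA
  simp only [pvCur, List.isEmpty_nil, if_pos, List.nil_append] at hA
  show List.map String.ofList (pvFinal (List.foldl pvAStep ([], [], 0, 0, 0) (pvLines content))) = _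
  rw [hA, List.map_map]
  rfl
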